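-- pv_equiv track=rewrite | github.com/facundoPri/algoritmo-programacion-i-essaya | clases/clase-6-19-10-2020/ej6_2.py | reemplazar_espacios
-- ===== SOURCE A (Python) =====
-- def reemplazar_espacios(cadena, caracter):
--     reemplazada = ''
--     for c in cadena:
--         if c == ' ':
--             reemplazada += caracter
--         else:
--             reemplazada += c
--     return reemplazada
-- ===== SOURCE B (Python) =====
-- def reemplazar_espacios(cadena, caracter):
--     return caracter.join(cadena.split(' '))
-- ===== Notes on version B (the rewrite author's own statement) =====
-- stated objective: faster
-- what changed: Replaces the per-character loop with string concatenation by a split-on-space / join-with-caracter one-liner over the list of segments.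
import Mathlib
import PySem

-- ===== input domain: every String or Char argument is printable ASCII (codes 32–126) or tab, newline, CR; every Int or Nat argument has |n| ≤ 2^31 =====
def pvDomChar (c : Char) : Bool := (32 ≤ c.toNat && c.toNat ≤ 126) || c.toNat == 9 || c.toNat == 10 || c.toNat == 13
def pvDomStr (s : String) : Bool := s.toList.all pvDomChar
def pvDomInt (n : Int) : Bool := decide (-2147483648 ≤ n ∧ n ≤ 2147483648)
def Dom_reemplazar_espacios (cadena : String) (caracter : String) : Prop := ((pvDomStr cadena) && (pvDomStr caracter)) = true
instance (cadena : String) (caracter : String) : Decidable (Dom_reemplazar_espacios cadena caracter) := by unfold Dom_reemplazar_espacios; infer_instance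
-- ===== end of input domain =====

-- B replaces A's per-character accumulating loop with an idiomatic split-on-space / join-with-caracter one-liner.

-- ===== PORT A =====
-- character loop: start from '', append caracter for each ' ', the character itself otherwise
def reemplazar_espacios (cadena : String) (caracter : String) : String :=
  String.ofList
    (cadena.toList.foldl
      (fun reemplazada c =>
        if c == ' ' then reemplazada ++ caracter.toList else reemplazada ++ [c]) [])

-- ===== PORT B =====
-- caracter.join(cadena.split(' ')): Chars.splitOn is Python's str.split for a nonempty separator
def reemplazar_espacios_alt (cadena : String) (caracter : String) : String :=
  String.ofList (PySem.Chars.join caracter.toList (PySem.Chars.splitOn cadena.toList [' ']))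

-- ===== PRECONDITION & SPEC =====
def Spec_reemplazar_espacios (cadena : String) (caracter : String) (out : String) : Prop := out = reemplazar_espacios_alt cadena caracter
instance (cadena : String) (caracter : String) (out : String) : Decidable (Spec_reemplazar_espacios cadena caracter out) := by unfold Spec_reemplazar_espacios; infer_instance

-- ===== CLAIM (what is proved, stated in full; the proofs are below) =====
def Claim_equal_reemplazar_espacios : Prop := ∀ (cadena : String) (caracter : String), Dom_reemplazar_espacios cadena caracter → Spec_reemplazar_espacios cadena caracter (reemplazar_espacios cadena caracter)

-- ===== LEMMAS AND PROOFS =====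

theorem go_ne_nil (sep : List Char) (fuel : Nat) (l cur : List Char)
    (acc : List (List Char)) : PySem.Chars.splitOn.go sep fuel l cur acc ≠ [] := by
  induction fuel generalizing l cur acc with
  | zero => simp [PySem.Chars.splitOn.go]
  | succ n ih =>
    cases l with
    | nil => simp [PySem.Chars.splitOn.go]
    | cons c rest =>
      rw [PySem.Chars.splitOn.go]
      split
      · exact ih _ _ _
      · exact ih _ _ _

theorem go_acc (sep : List Char) (fuel : Nat) (l cur : List Char)
    (acc : List (List Char)) :
    PySem.Chars.splitOn.go sep fuel l cur acc
      = acc.reverse ++ PySem.Chars.splitOn.go sep fuel l cur [] := by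
  induction fuel generalizing l cur acc with
  | zero => simp [PySem.Chars.splitOn.go]
  | succ n ih =>
    cases l with
    | nil => simp [PySem.Chars.splitOn.go]
    | cons c rest =>
      rw [PySem.Chars.splitOn.go, PySem.Chars.splitOn.go]
      split
      · rw [ih _ _ (cur.reverse :: acc), ih _ _ [cur.reverse]]
        simp
      · exact ih _ _ _

theorem go_join (sep' : List Char) (fuel : Nat) (l cur : List Char)
    (h : l.length ≤ fuel) :
    PySem.Chars.join sep' (PySem.Chars.splitOn.go [' '] fuel l cur [])
      = cur.reverse ++ l.flatMap (fun c => if c == ' ' then sep' else [c]) := by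
  induction fuel generalizing l cur with
  | zero =>
    have : l = [] := List.eq_nil_of_length_eq_zero (Nat.le_zero.mp h)
    subst this
    simp [PySem.Chars.splitOn.go, PySem.Chars.join_singleton]
  | succ n ih =>
    cases l with
    | nil => simp [PySem.Chars.splitOn.go, PySem.Chars.join_singleton]
    | cons c rest =>
      rw [PySem.Chars.splitOn.go]
      have hlen : rest.length ≤ n := Nat.lt_succ_iff.mp (by simpa using h)
      by_cases hc : c = ' '
      · subst hc
        have hpre : [' '].isPrefixOf (' ' :: rest) = true := by simp [List.isPrefixOf]
        rw [if_pos hpre]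
        rw [go_acc]
        obtain ⟨p, parts, hp⟩ :=
          List.exists_cons_of_ne_nil (go_ne_nil [' '] n (List.drop [' '].length (' ' :: rest)) [] [])
        rw [hp]
        simp only [List.reverse_cons, List.reverse_nil, List.nil_append, List.cons_append,
          List.nil_append, PySem.Chars.join_cons_cons]
        have := ih (List.drop [' '].length (' ' :: rest)) [] (by simpa using hlen)
        rw [hp] at this
        rw [this]
        simp
      · have hpre : [' '].isPrefixOf (c :: rest) = false := by
          simp [List.isPrefixOf]
          intro h'; exact absurd h'.symm hc
        rw [if_neg (by simp [hpre])]
        rw [ih rest (c :: cur) hlen]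
        simp [hc]

-- ===== VERDICT (by name: the statement is the Claim_ definition above) =====
theorem reemplazar_espacios_spec : Claim_equal_reemplazar_espacios := by
  intro cadena caracter _
  unfold Spec_reemplazar_espacios reemplazar_espacios reemplazar_espacios_alt
  have hb : (fun (reemplazada : List Char) (c : Char) =>
      if c == ' ' then reemplazada ++ caracter.toList else reemplazada ++ [c])
      = (fun reemplazada c => reemplazada ++ (if c == ' ' then caracter.toList else [c])) := by
    funext r c; split <;> rfl
  rw [hb, PySem.List.foldl_append_eq_flatMap]
  rw [PySem.Chars.splitOn, go_join caracter.toList _ _ _ (Nat.le_succ_of_le (Nat.le_refl _))]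
  simp
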